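-- pv_equiv track=rewrite | github.com/aykinuz-stack/smartcampus-ai | views/_gen_weekly_plan_pdf.py | _week_to_unit
-- ===== SOURCE A (Python) =====
-- def _week_to_unit(week_num: int) -> int:
--     """Hafta numarasini unite numarasina cevirir (1-10)."""
--     if week_num <= 0:
--         return 1
--     _breaks = [4, 7, 11, 14, 18, 22, 25, 29, 32, 37]
--     for i, brk in enumerate(_breaks):
--         if week_num < brk:
--             return i + 1
--     return 10
-- ===== SOURCE B (Python) =====
-- import bisect
--
-- def _week_to_unit(week_num: int) -> int:
--     """Hafta numarasini unite numarasina cevirir (1-10)."""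
--     _breaks = [4, 7, 11, 14, 18, 22, 25, 29, 32, 37]
--     return min(bisect.bisect_right(_breaks, week_num) + 1, 10)
-- ===== Notes on version B (the rewrite author's own statement) =====
-- stated objective: simpler
-- what changed: Replaces the guard plus linear enumerate-scan over the break table with a single binary search (bisect_right counts breaks <= week_num, naturally giving 1 for non-positive weeks) clamped to 10.
import Mathlib
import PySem

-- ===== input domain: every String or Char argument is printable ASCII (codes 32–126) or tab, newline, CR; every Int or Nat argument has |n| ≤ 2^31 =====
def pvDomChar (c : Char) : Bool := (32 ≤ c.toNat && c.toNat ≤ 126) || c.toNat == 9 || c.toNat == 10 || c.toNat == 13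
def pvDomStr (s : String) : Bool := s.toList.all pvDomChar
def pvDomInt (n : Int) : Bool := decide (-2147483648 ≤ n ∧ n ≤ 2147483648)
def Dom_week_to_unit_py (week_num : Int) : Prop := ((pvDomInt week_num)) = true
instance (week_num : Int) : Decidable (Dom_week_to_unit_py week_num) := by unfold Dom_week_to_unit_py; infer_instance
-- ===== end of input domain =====

-- B replaces A's guard + linear scan of the break table with one clamped binary search (bisect_right); simpler, same result.

-- ===== PORT A =====
-- the `for i, brk in enumerate(_breaks)` loop with its early `return i + 1`
def weekLoopA : List (Int × Int) → Int → Option Int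
  | [], _ => none
  | (i, brk) :: rest, w => if w < brk then some (i + 1) else weekLoopA rest w

def week_to_unit_py (week_num : Int) : Int :=
  if week_num ≤ 0 then 1
  else
    match weekLoopA (PySem.List.enumerate [(4 : Int), 7, 11, 14, 18, 22, 25, 29, 32, 37]) week_num with
    | some r => r
    | none => 10

-- ===== PORT B =====
-- bisect.bisect_right: standard lo/hi binary search, first index with x < xs[lo]
def bisectRight (xs : List Int) (x : Int) (lo hi : Nat) : Nat :=
  if h : lo < hi then
    let mid := (lo + hi) / 2
    if x < xs.getD mid 0 then bisectRight xs x lo mid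
    else bisectRight xs x (mid + 1) hi
  else lo
termination_by hi - lo
decreasing_by all_goals omega

def week_to_unit_py_alt (week_num : Int) : Int :=
  let breaks : List Int := [4, 7, 11, 14, 18, 22, 25, 29, 32, 37]
  min ((bisectRight breaks week_num 0 breaks.length : Int) + 1) 10

-- ===== PRECONDITION & SPEC =====
def Spec_week_to_unit_py (week_num : Int) (out : Int) : Prop := out = week_to_unit_py_alt week_num
instance (week_num : Int) (out : Int) : Decidable (Spec_week_to_unit_py week_num out) := by unfold Spec_week_to_unit_py; infer_instance

-- ===== CLAIM (what is proved, stated in full; the proofs are below) =====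
def Claim_equal_week_to_unit_py : Prop := ∀ (week_num : Int), Dom_week_to_unit_py week_num → Spec_week_to_unit_py week_num (week_to_unit_py week_num)

-- ===== LEMMAS AND PROOFS =====

-- ===== VERDICT (by name: the statement is the Claim_ definition above) =====
set_option maxRecDepth 10000 in
set_option maxHeartbeats 1600000 in
theorem week_to_unit_py_spec : Claim_equal_week_to_unit_py := by
  intro w _
  unfold Spec_week_to_unit_py week_to_unit_py week_to_unit_py_alt
  simp only [PySem.List.enumerate_cons, PySem.List.enumerate_nil, List.length_cons, List.length_nil]
  simp only [weekLoopA]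
  simp [bisectRight, List.getD]
  split_ifs <;> simp <;> omega
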